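-- pv_equiv track=rewrite | github.com/senumulapally/DataStructures | BinarySearch/right_most_index.py | getRightMostIndex
-- ===== SOURCE A (Python) =====
-- def getRightMostIndex(nums, target):
--     """
--             :type nums: List[int]
--             :type target: int
--             :rtype: int
--     """
--     start = 0 # Initializing start-pointer
--     end = len(nums) - 1  # Initializing end-pointer
--     while start <= end:
--         '''
--         While loop ends when start-pointer is greater than end-pointer.
--         Loop condition is start<=end because when start = end either the target value 'found' or 'not found' conditions
--         are met
--         '''
--         mid = start + (end - start) // 2  # Calculating mid-point (Integer Overflow exception handled)
--         if target < nums[mid]: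
--             end = mid - 1  # Updating end-pointer when target is less than the mid-pointer value
--         elif target > nums[mid]:
--             start = mid + 1  # Updating start-pointer when target is greater than the mid-pointer value
--         else:
--             break  # Breaking the loop when the target value matched mid-pointer value
--
--     while mid < len(nums)-1:  # Looping while mid-value is less than length of array
--         if target == nums[mid + 1]:  # Condition to find if the next value is still the target value
--             mid += 1  # If yes, mid-pointer is moved to the next value
--         else:
--             break  # Else if there is some other value than the target value, the loop is broken
--     return mid  # Mid-value, pointed to the right most index of target value is returned.
-- ===== SOURCE B (Python) =====
-- def getRightMostIndex(nums, target):
--     # Same probe sequence as a classic binary search, written as a pure recursion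
--     # (no mutable pointers), then the end of the run of targets found arithmetically
--     # with next() over a range instead of a walking loop.
--     def search(lo, hi):
--         mid = (lo + hi) // 2
--         if target < nums[mid]:
--             return search(lo, mid - 1) if lo <= mid - 1 else mid
--         if target > nums[mid]:
--             return search(mid + 1, hi) if mid + 1 <= hi else mid
--         return mid
--
--     mid = search(0, len(nums) - 1)
--     return next((k for k in range(mid + 1, len(nums)) if nums[k] != target),
--                 len(nums)) - 1
-- ===== Notes on version B (the rewrite author's own statement) =====
-- stated objective: alternative
-- what changed: the two pointer-mutating while loops (search, then walk right over duplicates) become a pure recursive binary search and a single next()-over-range expression that locates the end of the run of targets; the probe sequence, and hence the returned value, is identical on every nonempty list, sorted or not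
import Mathlib
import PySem

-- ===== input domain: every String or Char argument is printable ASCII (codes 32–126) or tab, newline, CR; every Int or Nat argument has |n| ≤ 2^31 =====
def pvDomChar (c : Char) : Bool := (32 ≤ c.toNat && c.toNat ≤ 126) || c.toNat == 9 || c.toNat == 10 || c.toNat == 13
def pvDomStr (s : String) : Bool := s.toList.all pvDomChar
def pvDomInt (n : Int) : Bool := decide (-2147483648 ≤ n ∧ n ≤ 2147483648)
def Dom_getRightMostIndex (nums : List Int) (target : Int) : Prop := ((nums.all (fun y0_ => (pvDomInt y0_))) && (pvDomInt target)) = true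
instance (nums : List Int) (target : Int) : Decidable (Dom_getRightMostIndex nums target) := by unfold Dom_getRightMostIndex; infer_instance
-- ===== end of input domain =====

-- B re-decomposes A (a recursive binary search and a next()-over-range scan instead of two
-- pointer-mutating while loops); same value on every nonempty list, which is what is proved.

-- ===== PORT A =====
-- termination measures of the ports' loops (cited by name in decreasing_by)
theorem pvA_dec1 (start end_ : Int) (h : start ≤ end_) :
    (start + PySem.Int.floordiv (end_ - start) 2 - 1 + 1 - start).toNat < (end_ + 1 - start).toNat := by
  rw [PySem.Int.floordiv_eq_ediv_of_pos (by norm_num)]; omega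

theorem pvA_dec2 (start end_ : Int) (h : start ≤ end_) :
    (end_ + 1 - (start + PySem.Int.floordiv (end_ - start) 2 + 1)).toNat < (end_ + 1 - start).toNat := by
  rw [PySem.Int.floordiv_eq_ediv_of_pos (by norm_num)]; omega

theorem pvW_dec (L mid : Int) (h : mid < L - 1) :
    (L - 1 - (mid + 1)).toNat < (L - 1 - mid).toNat := by omega

theorem pvB_dec1 (lo hi : Int) (h : lo ≤ PySem.Int.floordiv (lo + hi) 2 - 1) :
    (PySem.Int.floordiv (lo + hi) 2 - 1 + 1 - lo).toNat < (hi + 1 - lo).toNat := by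
  rw [PySem.Int.floordiv_eq_ediv_of_pos (by norm_num)] at *; omega

theorem pvB_dec2 (lo hi : Int) (h : PySem.Int.floordiv (lo + hi) 2 + 1 ≤ hi) :
    (hi + 1 - (PySem.Int.floordiv (lo + hi) 2 + 1)).toNat < (hi + 1 - lo).toNat := by
  rw [PySem.Int.floordiv_eq_ediv_of_pos (by norm_num)] at *; omega

-- A's first while loop; `mid?` carries the last assigned mid (Python's mutable `mid`);
-- `none` = Python raising (`mid` never assigned on [], or IndexError from nums[mid])
def pvA_search (nums : List Int) (target : Int) (start end_ : Int) (mid? : Option Int) : Option Int :=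
  if h : start ≤ end_ then
    match PySem.List.pyGet? nums (start + PySem.Int.floordiv (end_ - start) 2) with
    | none => none
    | some v =>
      if target < v then
        pvA_search nums target start (start + PySem.Int.floordiv (end_ - start) 2 - 1)
          (some (start + PySem.Int.floordiv (end_ - start) 2))
      else if target > v then
        pvA_search nums target (start + PySem.Int.floordiv (end_ - start) 2 + 1) end_
          (some (start + PySem.Int.floordiv (end_ - start) 2))
      else some (start + PySem.Int.floordiv (end_ - start) 2)
  else mid?
termination_by (end_ + 1 - start).toNat
decreasing_by
  · exact pvA_dec1 start end_ h
  · exact pvA_dec2 start end_ h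

-- A's second while loop: walk right while the next value is still the target
def pvA_walk (nums : List Int) (target : Int) (mid : Int) : Option Int :=
  if h : mid < (nums.length : Int) - 1 then
    match PySem.List.pyGet? nums (mid + 1) with
    | none => none
    | some v => if target = v then pvA_walk nums target (mid + 1) else some mid
  else some mid
termination_by ((nums.length : Int) - 1 - mid).toNat
decreasing_by exact pvW_dec _ _ h

def getRightMostIndex (nums : List Int) (target : Int) : Int :=
  match pvA_search nums target 0 ((nums.length : Int) - 1) none with
  | none => 0          -- Python raises here (UnboundLocalError on []); outside Pre_
  | some m => (pvA_walk nums target m).getD 0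

-- ===== PORT B =====
-- B's recursive `search`; `none` = IndexError from nums[mid] (reached only on [])
def pvB_search (nums : List Int) (target : Int) (lo hi : Int) : Option Int :=
  match PySem.List.pyGet? nums (PySem.Int.floordiv (lo + hi) 2) with
  | none => none
  | some v =>
    if target < v then
      if h : lo ≤ PySem.Int.floordiv (lo + hi) 2 - 1 then
        pvB_search nums target lo (PySem.Int.floordiv (lo + hi) 2 - 1)
      else some (PySem.Int.floordiv (lo + hi) 2)
    else if target > v then
      if h : PySem.Int.floordiv (lo + hi) 2 + 1 ≤ hi then
        pvB_search nums target (PySem.Int.floordiv (lo + hi) 2 + 1) hi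
      else some (PySem.Int.floordiv (lo + hi) 2)
    else some (PySem.Int.floordiv (lo + hi) 2)
termination_by (hi + 1 - lo).toNat
decreasing_by
  · exact pvB_dec1 lo hi h
  · exact pvB_dec2 lo hi h

-- B's `next((k for k in range(mid+1, len(nums)) if nums[k] != target), len(nums))`
def pvB_scan (nums : List Int) (target : Int) (ks : List Int) : Option Int :=
  match ks with
  | [] => some (nums.length : Int)
  | k :: rest =>
    match PySem.List.pyGet? nums k with
    | none => none
    | some v => if v ≠ target then some k else pvB_scan nums target rest

def getRightMostIndex_alt (nums : List Int) (target : Int) : Int :=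
  match pvB_search nums target 0 ((nums.length : Int) - 1) with
  | none => 0          -- Python raises here (IndexError on []); outside Pre_
  | some m =>
    match pvB_scan nums target (PySem.List.pyRange (m + 1) (nums.length : Int) 1) with
    | none => 0
    | some j => j - 1

-- ===== PRECONDITION & SPEC =====
-- Pre_ excludes only the empty list, on which A raises UnboundLocalError (its `mid` is never
-- assigned) and B raises IndexError; A returns normally on every nonempty list.
def Pre_getRightMostIndex (nums : List Int) (target : Int) : Prop := nums ≠ []
instance (nums : List Int) (target : Int) : Decidable (Pre_getRightMostIndex nums target) := by
  unfold Pre_getRightMostIndex; infer_instance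

def pvWitness_getRightMostIndex : List Int × Int := ([1, 2, 2, 3], 2)

def Spec_getRightMostIndex (nums : List Int) (target : Int) (out : Int) : Prop := out = getRightMostIndex_alt nums target
instance (nums : List Int) (target : Int) (out : Int) : Decidable (Spec_getRightMostIndex nums target out) := by unfold Spec_getRightMostIndex; infer_instance

-- ===== CLAIM (what is proved, stated in full; the proofs are below) =====
def Claim_equal_getRightMostIndex : Prop := ∀ (nums : List Int) (target : Int), Dom_getRightMostIndex nums target → Pre_getRightMostIndex nums target → Spec_getRightMostIndex nums target (getRightMostIndex nums target)

-- ===== LEMMAS AND PROOFS =====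

-- A's loop with the carried mid equals B's guarded recursion on any nonempty window
lemma pv_search_eq (nums : List Int) (target : Int) :
    ∀ (n : Nat) (lo hi : Int) (mid? : Option Int), (hi + 1 - lo).toNat = n → lo ≤ hi →
    pvA_search nums target lo hi mid? = pvB_search nums target lo hi := by
  intro n
  induction n using Nat.strong_induction_on with
  | _ n ih =>
    intro lo hi mid? hn hle
    have hfd : PySem.Int.floordiv (lo + hi) 2 = (lo + hi) / 2 :=
      PySem.Int.floordiv_eq_ediv_of_pos (by norm_num)
    have hfd2 : PySem.Int.floordiv (hi - lo) 2 = (hi - lo) / 2 :=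
      PySem.Int.floordiv_eq_ediv_of_pos (by norm_num)
    have hmide : lo + PySem.Int.floordiv (hi - lo) 2 = PySem.Int.floordiv (lo + hi) 2 := by
      rw [hfd, hfd2]; omega
    rw [pvA_search, dif_pos hle, pvB_search, hmide]
    cases hv : PySem.List.pyGet? nums (PySem.Int.floordiv (lo + hi) 2) with
    | none => rfl
    | some v =>
      dsimp only
      by_cases h1 : target < v
      · rw [if_pos h1, if_pos h1]
        by_cases h2 : lo ≤ PySem.Int.floordiv (lo + hi) 2 - 1
        · rw [dif_pos h2]
          exact ih ((PySem.Int.floordiv (lo + hi) 2 - 1) + 1 - lo).toNat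
            (by rw [hfd] at *; omega) lo _ _ rfl h2
        · rw [dif_neg h2, pvA_search, dif_neg h2]
      · rw [if_neg h1, if_neg h1]
        by_cases h3 : target > v
        · rw [if_pos h3, if_pos h3]
          by_cases h2 : PySem.Int.floordiv (lo + hi) 2 + 1 ≤ hi
          · rw [dif_pos h2]
            exact ih (hi + 1 - (PySem.Int.floordiv (lo + hi) 2 + 1)).toNat
              (by rw [hfd] at *; omega) _ hi _ rfl h2
          · rw [dif_neg h2, pvA_search, dif_neg h2]
        · rw [if_neg h3, if_neg h3]

-- B's search stays inside the window
lemma pv_search_bounds (nums : List Int) (target : Int) :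
    ∀ (n : Nat) (lo hi : Int), (hi + 1 - lo).toNat = n → 0 ≤ lo → lo ≤ hi →
    hi < (nums.length : Int) →
    ∃ m : Int, pvB_search nums target lo hi = some m ∧ lo ≤ m ∧ m ≤ hi := by
  intro n
  induction n using Nat.strong_induction_on with
  | _ n ih =>
    intro lo hi hn h0 hle hhi
    have hfd : PySem.Int.floordiv (lo + hi) 2 = (lo + hi) / 2 :=
      PySem.Int.floordiv_eq_ediv_of_pos (by norm_num)
    have hget : PySem.List.pyGet? nums (PySem.Int.floordiv (lo + hi) 2)
        = some (nums[(PySem.Int.floordiv (lo + hi) 2).toNat]'(by rw [hfd]; omega)) :=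
      PySem.List.pyGet?_eq_some_getElem nums (by rw [hfd]; omega) (by rw [hfd]; omega)
    rw [pvB_search, hget]
    dsimp only
    by_cases h1 : target < nums[(PySem.Int.floordiv (lo + hi) 2).toNat]'(by rw [hfd]; omega)
    · rw [if_pos h1]
      by_cases h2 : lo ≤ PySem.Int.floordiv (lo + hi) 2 - 1
      · rw [dif_pos h2]
        obtain ⟨m, hm, hm1, hm2⟩ := ih ((PySem.Int.floordiv (lo + hi) 2 - 1) + 1 - lo).toNat
          (by rw [hfd] at *; omega) lo _ rfl h0 h2 (by rw [hfd] at *; omega)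
        exact ⟨m, hm, hm1, by rw [hfd] at *; omega⟩
      · rw [dif_neg h2]
        exact ⟨_, rfl, by rw [hfd] at *; omega, by rw [hfd] at *; omega⟩
    · rw [if_neg h1]
      by_cases h3 : target > nums[(PySem.Int.floordiv (lo + hi) 2).toNat]'(by rw [hfd]; omega)
      · rw [if_pos h3]
        by_cases h2 : PySem.Int.floordiv (lo + hi) 2 + 1 ≤ hi
        · rw [dif_pos h2]
          obtain ⟨m, hm, hm1, hm2⟩ := ih (hi + 1 - (PySem.Int.floordiv (lo + hi) 2 + 1)).toNat
            (by rw [hfd] at *; omega) _ hi rfl (by rw [hfd] at *; omega) h2 hhi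
          exact ⟨m, hm, by rw [hfd] at *; omega, hm2⟩
        · rw [dif_neg h2]
          exact ⟨_, rfl, by rw [hfd] at *; omega, by rw [hfd] at *; omega⟩
      · rw [if_neg h3]
        exact ⟨_, rfl, by rw [hfd] at *; omega, by rw [hfd] at *; omega⟩

-- A's walk and B's scan over range(m+1, len) compute the same index (scan is one past it)
lemma pv_walk_scan (nums : List Int) (target : Int) :
    ∀ (n : Nat) (m : Int), ((nums.length : Int) - 1 - m).toNat = n →
    0 ≤ m → m < (nums.length : Int) →
    ∃ j : Int, pvA_walk nums target m = some j ∧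
      pvB_scan nums target (PySem.List.pyRange (m + 1) (nums.length : Int) 1) = some (j + 1) := by
  intro n
  induction n using Nat.strong_induction_on with
  | _ n ih =>
    intro m hn h0 hm
    by_cases hlt : m < (nums.length : Int) - 1
    · have hget : PySem.List.pyGet? nums (m + 1)
          = some (nums[(m + 1).toNat]'(by omega)) :=
        PySem.List.pyGet?_eq_some_getElem nums (by omega) (by omega)
      have hcons : PySem.List.pyRange (m + 1) (nums.length : Int) 1
          = (m + 1) :: PySem.List.pyRange (m + 1 + 1) (nums.length : Int) 1 :=
        PySem.List.pyRange_one_cons (by omega)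
      rw [pvA_walk, dif_pos hlt, hget, hcons, pvB_scan, hget]
      dsimp only
      by_cases heq : target = nums[(m + 1).toNat]'(by omega)
      · rw [if_pos heq, if_neg (by simpa using heq.symm)]
        exact ih ((nums.length : Int) - 1 - (m + 1)).toNat (by omega) (m + 1) rfl
          (by omega) (by omega)
      · rw [if_neg heq, if_pos (by simpa using fun h => heq h.symm)]
        exact ⟨m, rfl, rfl⟩
    · rw [pvA_walk, dif_neg hlt]
      have hnil : PySem.List.pyRange (m + 1) (nums.length : Int) 1 = [] := by
        have hx : ¬ (m + 1) < (nums.length : Int) := by omega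
        cases hr : PySem.List.pyRange (m + 1) (nums.length : Int) 1 with
        | nil => rfl
        | cons a l =>
          have : a ∈ PySem.List.pyRange (m + 1) (nums.length : Int) 1 := by
            rw [hr]; exact List.mem_cons_self
          have := (PySem.List.mem_pyRange_one.mp this)
          omega
      rw [hnil, pvB_scan]
      exact ⟨m, rfl, by congr 1; omega⟩

-- ===== VERDICT (by name: the statement is the Claim_ definition above) =====
theorem getRightMostIndex_spec : Claim_equal_getRightMostIndex := by
  intro nums target _hdom hpre
  have hlen : 0 < nums.length := List.length_pos_iff.mpr hpre
  have hle : (0 : Int) ≤ (nums.length : Int) - 1 := by omega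
  obtain ⟨m, hm, hm0, hm1⟩ := pv_search_bounds nums target
    (((nums.length : Int) - 1) + 1 - 0).toNat 0 ((nums.length : Int) - 1) rfl le_rfl hle
    (by omega)
  have hAB : pvA_search nums target 0 ((nums.length : Int) - 1) none
      = pvB_search nums target 0 ((nums.length : Int) - 1) :=
    pv_search_eq nums target (((nums.length : Int) - 1) + 1 - 0).toNat 0
      ((nums.length : Int) - 1) none rfl hle
  obtain ⟨j, hwalk, hscan⟩ := pv_walk_scan nums target
    (((nums.length : Int) - 1 - m).toNat) m rfl hm0 (by omega)
  unfold Spec_getRightMostIndex getRightMostIndex getRightMostIndex_alt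
  rw [hAB, hm]
  dsimp only
  rw [hwalk, hscan]
  simp only [Option.getD_some]
  omega
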